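-- pv_equiv track=rewrite | github.com/michiakig/bangbangcon | scripts/generateSML.py | buildPathological
-- ===== SOURCE A (Python) =====
-- def x(i):
--     return "x" + str(i)
--
-- def buildPathological(depth):
--     ret = """structure P = struct
-- fun main _ = 0
-- val wat = fn _ =>
--    let val x0 = (fn y => fn z => z y y) in
-- """
--
--     # print the top part of the nesting
--     d1 = 1
--     d0 = d1 - 1
--     while (d1 <= depth):
--         ret = ret + ('   ' * (d1 + 1))
--         ret = ret + 'let val ' + x(d1) + ' = (fn y => ' + x(d0) + '(' + x(d0) + '(' + x(d0) + '(y)))) in\n'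
--         d1 = d1 + 1
--         d0 = d1 - 1
--
--     # print the inner let's body
--     ret = ret + ('   ' * (depth + 2)) + x(depth) + '\n'
--
--     # print the bottom part of the nesting
--     d = depth
--     while (d > 0):
--         ret = ret + ('   ' * (d + 1))
--         ret = ret + 'end\n'
--         d = d - 1
--
--     ret = ret + """   end
-- end"""
--
--     return ret
-- ===== SOURCE B (Python) =====
-- def x(i):
--     return "x" + str(i)
--
-- def buildPathological(depth):
--     header = """structure P = struct
-- fun main _ = 0
-- val wat = fn _ =>
--    let val x0 = (fn y => fn z => z y y) in
-- """
--     # build the nesting inside-out: start from the innermost body as a list of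
--     # chunks and wrap it, one level at a time, from depth down to 1
--     core = [('   ' * (depth + 2)) + x(depth) + '\n']
--     for d in range(depth, 0, -1):
--         core = [('   ' * (d + 1)) + 'let val ' + x(d) + ' = (fn y => '
--                 + x(d - 1) + '(' + x(d - 1) + '(' + x(d - 1) + '(y)))) in\n'] \
--                + core + [('   ' * (d + 1)) + 'end\n']
--     return header + ''.join(core) + """   end
-- end"""
-- ===== Notes on version B (the rewrite author's own statement) =====
-- stated objective: faster
-- what changed: A builds the top half of the nesting with one while loop and the bottom half with a second while loop, growing one string by repeated concatenation; B builds the string inside-out in a single loop that wraps a list of chunks with one let-line and one end-line per level and joins them once at the end.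
import Mathlib
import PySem

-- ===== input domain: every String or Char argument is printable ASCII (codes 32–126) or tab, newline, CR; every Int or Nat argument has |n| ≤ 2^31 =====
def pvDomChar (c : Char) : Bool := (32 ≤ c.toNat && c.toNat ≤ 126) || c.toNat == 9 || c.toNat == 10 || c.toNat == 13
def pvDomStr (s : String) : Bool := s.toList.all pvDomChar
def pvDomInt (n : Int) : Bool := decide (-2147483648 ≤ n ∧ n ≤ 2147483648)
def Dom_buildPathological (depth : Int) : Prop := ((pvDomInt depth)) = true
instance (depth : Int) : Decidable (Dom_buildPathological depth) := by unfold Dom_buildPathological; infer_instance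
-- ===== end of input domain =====

-- B replaces A's two separate while loops (top half, then bottom half, grown by
-- repeated string concatenation) by a single inside-out pass that wraps a list of
-- chunks one nesting level at a time and joins it once; measured faster at large depth.

-- Python 's * n' for a string and an int (empty for n ≤ 0)
def pyStrMul (s : String) (n : Int) : String :=
  String.ofList (PySem.List.pyRepeat s.toList n)

-- ===== PORT A =====
def pyX (i : Int) : String := "x" ++ PySem.Int.toStr i

def buildPathological (depth : Int) : String :=
  let ret : String := "structure P = struct\nfun main _ = 0\nval wat = fn _ =>\n   let val x0 = (fn y => fn z => z y y) in\n"
  -- while (d1 <= depth) with d1 = 1, 2, … and d0 = d1 - 1  ==  for d1 in range(1, depth+1)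
  let ret := (PySem.List.pyRange 1 (depth + 1) 1).foldl
      (fun ret d1 =>
        ret ++ pyStrMul "   " (d1 + 1)
            ++ "let val " ++ pyX d1 ++ " = (fn y => " ++ pyX (d1 - 1) ++ "("
            ++ pyX (d1 - 1) ++ "(" ++ pyX (d1 - 1) ++ "(y)))) in\n") ret
  let ret := ret ++ pyStrMul "   " (depth + 2) ++ pyX depth ++ "\n"
  -- while (d > 0) with d = depth, depth-1, …  ==  for d in range(depth, 0, -1)
  let ret := (PySem.List.pyRange depth 0 (-1)).foldl
      (fun ret d => ret ++ pyStrMul "   " (d + 1) ++ "end\n") ret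
  ret ++ "   end\nend"

-- ===== PORT B =====
def pyX_alt (i : Int) : String := "x" ++ PySem.Int.toStr i

def buildPathological_alt (depth : Int) : String :=
  let core : List String := [pyStrMul "   " (depth + 2) ++ pyX_alt depth ++ "\n"]
  let core := (PySem.List.pyRange depth 0 (-1)).foldl
      (fun core d =>
        [pyStrMul "   " (d + 1) ++ "let val " ++ pyX_alt d ++ " = (fn y => "
          ++ pyX_alt (d - 1) ++ "(" ++ pyX_alt (d - 1) ++ "(" ++ pyX_alt (d - 1)
          ++ "(y)))) in\n"] ++ core ++ [pyStrMul "   " (d + 1) ++ "end\n"]) core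
  "structure P = struct\nfun main _ = 0\nval wat = fn _ =>\n   let val x0 = (fn y => fn z => z y y) in\n"
    ++ PySem.Str.join "" core ++ "   end\nend"

-- ===== PRECONDITION & SPEC =====
def Spec_buildPathological (depth : Int) (out : String) : Prop := out = buildPathological_alt depth
instance (depth : Int) (out : String) : Decidable (Spec_buildPathological depth out) := by unfold Spec_buildPathological; infer_instance

-- ===== CLAIM (what is proved, stated in full; the proofs are below) =====
def Claim_equal_buildPathological : Prop := ∀ (depth : Int), Dom_buildPathological depth → Spec_buildPathological depth (buildPathological depth)

-- ===== LEMMAS AND PROOFS =====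

-- the characters appended for one "let val …" line
def topL (d : Int) : List Char :=
  (pyStrMul "   " (d + 1)).toList ++ "let val ".toList ++ (pyX d).toList
    ++ " = (fn y => ".toList ++ (pyX (d - 1)).toList ++ "(".toList
    ++ (pyX (d - 1)).toList ++ "(".toList ++ (pyX (d - 1)).toList
    ++ "(y)))) in\n".toList

-- the characters appended for one "end" line
def endL (d : Int) : List Char :=
  (pyStrMul "   " (d + 1)).toList ++ "end\n".toList

lemma foldA1 (l : List Int) (acc : String) :
    ((l.foldl
      (fun ret d1 =>
        ret ++ pyStrMul "   " (d1 + 1)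
            ++ "let val " ++ pyX d1 ++ " = (fn y => " ++ pyX (d1 - 1) ++ "("
            ++ pyX (d1 - 1) ++ "(" ++ pyX (d1 - 1) ++ "(y)))) in\n") acc)).toList
    = acc.toList ++ (l.map topL).flatten := by
  induction l generalizing acc with
  | nil => simp
  | cons a t ih => simp [List.foldl, ih, topL, List.append_assoc]

lemma foldA2 (l : List Int) (acc : String) :
    ((l.foldl (fun ret d => ret ++ pyStrMul "   " (d + 1) ++ "end\n") acc)).toList
    = acc.toList ++ (l.map endL).flatten := by
  induction l generalizing acc with
  | nil => simp
  | cons a t ih => simp [List.foldl, ih, endL, List.append_assoc]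

lemma chars_join_nil (ls : List (List Char)) : PySem.Chars.join [] ls = ls.flatten := by
  induction ls with
  | nil => simp [PySem.Chars.join, List.intercalate]
  | cons a t ih =>
    cases t with
    | nil => simp [PySem.Chars.join, List.intercalate]
    | cons b u =>
      rw [PySem.Chars.join_cons_cons]
      simp [ih]

lemma join_toList (l : List String) :
    (PySem.Str.join "" l).toList = (l.map String.toList).flatten := by
  simp [PySem.Str.join, chars_join_nil]

lemma foldB (n : Nat) : ∀ (d : Int), d.toNat = n → ∀ (acc : List String),
    (((PySem.List.pyRange d 0 (-1)).foldl
      (fun core d =>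
        [pyStrMul "   " (d + 1) ++ "let val " ++ pyX_alt d ++ " = (fn y => "
          ++ pyX_alt (d - 1) ++ "(" ++ pyX_alt (d - 1) ++ "(" ++ pyX_alt (d - 1)
          ++ "(y)))) in\n"] ++ core ++ [pyStrMul "   " (d + 1) ++ "end\n"]) acc).map
        String.toList).flatten
    = ((PySem.List.pyRange 1 (d + 1) 1).map topL).flatten ++ (acc.map String.toList).flatten
      ++ ((PySem.List.pyRange d 0 (-1)).map endL).flatten := by
  induction n with
  | zero =>
    intro d hd acc
    have hd0 : d ≤ 0 := by omega
    rw [PySem.List.pyRange_neg_one_eq_nil hd0, PySem.List.pyRange_one_eq_nil (by omega)]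
    simp
  | succ m ih =>
    intro d hd acc
    have hdpos : 0 < d := by omega
    rw [PySem.List.pyRange_neg_one_cons hdpos]
    have h1 : PySem.List.pyRange 1 (d + 1) 1 = PySem.List.pyRange 1 d 1 ++ [d] := by
      have := PySem.List.pyRange_one_succ_right (a := 1) (b := d) (by omega)
      simpa using this
    simp only [List.foldl_cons]
    rw [ih (d - 1) (by omega)]
    rw [h1]
    simp [topL, endL, pyX, pyX_alt, List.append_assoc]

-- ===== VERDICT (by name: the statement is the Claim_ definition above) =====
theorem buildPathological_spec : Claim_equal_buildPathological := by
  intro depth _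
  unfold Spec_buildPathological
  apply String.toList_inj.mp
  simp only [buildPathological, buildPathological_alt]
  simp only [String.toList_append]
  rw [foldA2]
  simp only [String.toList_append]
  rw [foldA1, join_toList, foldB depth.toNat depth rfl]
  simp [pyX, pyX_alt, List.append_assoc]
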